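-- pv_equiv track=rewrite | github.com/KuramitsuLab/pegtree | pegtree/peg.py | isCamelStyleName
-- ===== SOURCE A (Python) =====
-- def isCamelStyleName(name):
--     upper = 0
--     lower = 0
--     for c in list(name):
--         if c.isupper():
--             upper += 1
--         elif c.islower():
--             lower += 1
--     return upper > 0 and lower > 0
-- ===== SOURCE B (Python) =====
-- def isCamelStyleName(name):
--     return any(c.isupper() for c in name) and any(c.islower() for c in name)
-- ===== Notes on version B (the rewrite author's own statement) =====
-- stated objective: idiomatic
-- what changed: Replaces the single loop maintaining two integer counters with two short-circuiting any() existence scans whose results are conjoined.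
import Mathlib
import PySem

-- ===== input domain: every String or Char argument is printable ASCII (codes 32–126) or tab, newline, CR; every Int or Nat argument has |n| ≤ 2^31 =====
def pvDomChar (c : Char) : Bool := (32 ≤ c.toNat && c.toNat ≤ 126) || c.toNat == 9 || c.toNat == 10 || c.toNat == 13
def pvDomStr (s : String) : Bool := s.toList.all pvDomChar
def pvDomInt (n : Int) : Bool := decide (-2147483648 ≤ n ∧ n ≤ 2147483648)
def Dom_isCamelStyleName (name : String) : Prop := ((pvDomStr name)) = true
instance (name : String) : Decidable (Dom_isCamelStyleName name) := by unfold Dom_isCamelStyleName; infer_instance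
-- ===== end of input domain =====

-- B replaces A's single two-counter counting loop with two short-circuiting existence scans; return value only, same O(n) cost.

-- ===== PORT A =====
-- one step of A's loop body: bump the upper counter, else the lower counter
def camelStep (s : Int × Int) (c : Char) : Int × Int :=
  if PySem.Chars.isupper c then (s.1 + 1, s.2)
  else if PySem.Chars.islower c then (s.1, s.2 + 1)
  else s

def isCamelStyleName (name : String) : Bool :=
  let s := name.toList.foldl camelStep (0, 0)
  decide (s.1 > 0) && decide (s.2 > 0)

-- ===== PORT B =====
def isCamelStyleName_alt (name : String) : Bool :=
  name.toList.any PySem.Chars.isupper && name.toList.any PySem.Chars.islower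

-- ===== PRECONDITION & SPEC =====
def Spec_isCamelStyleName (name : String) (out : Bool) : Prop := out = isCamelStyleName_alt name
instance (name : String) (out : Bool) : Decidable (Spec_isCamelStyleName name out) := by unfold Spec_isCamelStyleName; infer_instance

-- ===== CLAIM (what is proved, stated in full; the proofs are below) =====
def Claim_equal_isCamelStyleName : Prop := ∀ (name : String), Dom_isCamelStyleName name → Spec_isCamelStyleName name (isCamelStyleName name)

-- ===== LEMMAS AND PROOFS =====

-- lower-case letters are never upper-case letters
theorem islower_isupper_false (c : Char) :
    PySem.Chars.islower c = true → PySem.Chars.isupper c = false := by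
  have ha : 'a'.val.toNat = 97 := rfl
  have hZ : 'Z'.val.toNat = 90 := rfl
  simp only [PySem.Chars.islower, PySem.Chars.isupper, Bool.and_eq_true, decide_eq_true_eq,
    Bool.and_eq_false_iff, decide_eq_false_iff_not, Char.le_def, UInt32.le_iff_toNat_le, ha, hZ]
  intro h
  right
  omega

-- A's loop computes the two counts
theorem foldl_camelStep (xs : List Char) (u l : Int) :
    xs.foldl camelStep (u, l) =
      (u + (xs.countP PySem.Chars.isupper : Int),
       l + (xs.countP (fun c => !PySem.Chars.isupper c && PySem.Chars.islower c) : Int)) := by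
  induction xs generalizing u l with
  | nil => simp
  | cons c xs ih =>
    simp only [List.foldl_cons, camelStep, List.countP_cons]
    by_cases hu : PySem.Chars.isupper c
    · simp [hu, ih]; ring
    · by_cases hl : PySem.Chars.islower c
      · simp [hu, hl, ih]; ring
      · simp [hu, hl, ih]

-- under the exclusivity of the elif, the second count counts exactly the lower-case letters
theorem countP_lower (xs : List Char) :
    xs.countP (fun c => !PySem.Chars.isupper c && PySem.Chars.islower c)
      = xs.countP PySem.Chars.islower := by
  apply List.countP_congr
  intro c _
  by_cases hl : PySem.Chars.islower c
  · simp [hl, islower_isupper_false c hl]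
  · simp [hl]

-- ===== VERDICT (by name: the statement is the Claim_ definition above) =====
theorem isCamelStyleName_spec : Claim_equal_isCamelStyleName := by
  intro name _
  unfold Spec_isCamelStyleName isCamelStyleName isCamelStyleName_alt
  rw [foldl_camelStep, countP_lower]
  simp only [zero_add, gt_iff_lt, Int.natCast_pos, List.countP_pos_iff, ← List.any_eq_true,
    Bool.decide_coe]
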